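-- pv_equiv track=rewrite | github.com/alwaysPKU/shuati_py3 | pinduoduo/3.py | tmp
-- ===== SOURCE A (Python) =====
-- def tmp(a, b):
--     a = a % b
--     dic = {}
--     pt = 0
--     while True:
--         dic[a] = pt
--         pt += 1
--         a *= 10
--         a %= b
--         if a == 0:
--             return pt, 0
--         if a in dic:
--             return pt - 1, pt - dic[a]
-- ===== SOURCE B (Python) =====
-- def tmp(a, b):
--     # Floyd tortoise-and-hare cycle detection on r -> r*10 % b; no remainder table.
--     def step(r):
--         return r * 10 % b
--     r0 = a % b
--     slow = step(r0)
--     fast = step(step(r0))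
--     while slow != fast:
--         slow = step(slow)
--         fast = step(step(fast))
--     # find mu (start of the cycle)
--     mu = 0
--     slow = r0
--     while slow != fast:
--         slow = step(slow)
--         fast = step(fast)
--         mu += 1
--     # measure lam (cycle length)
--     lam = 1
--     cur = step(slow)
--     while cur != slow:
--         cur = step(cur)
--         lam += 1
--     if slow == 0:
--         return max(mu, 1), 0
--     return mu + lam - 1, lam
-- ===== Notes on version B (the rewrite author's own statement) =====
-- stated objective: alternative
-- what changed: Replaces the remainder-to-index dictionary scan with Floyd's tortoise-and-hare cycle detection on the remainder sequence (two pointers, O(1) extra space) followed by the standard mu/lambda recovery phases, mapping (mu, lambda) back to A's output conventions.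
import Mathlib
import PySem

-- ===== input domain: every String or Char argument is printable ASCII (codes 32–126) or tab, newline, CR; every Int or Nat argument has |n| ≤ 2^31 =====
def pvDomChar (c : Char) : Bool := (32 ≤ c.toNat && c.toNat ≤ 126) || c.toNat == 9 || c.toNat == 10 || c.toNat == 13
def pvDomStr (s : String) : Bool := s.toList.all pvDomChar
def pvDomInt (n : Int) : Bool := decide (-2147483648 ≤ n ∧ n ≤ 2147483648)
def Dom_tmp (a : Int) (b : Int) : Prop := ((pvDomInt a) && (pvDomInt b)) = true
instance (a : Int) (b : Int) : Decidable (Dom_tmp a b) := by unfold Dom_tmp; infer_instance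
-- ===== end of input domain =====

-- B replaces A's remainder->index dictionary with Floyd's tortoise-and-hare cycle
-- detection (two pointers, constant extra space); equal output on every b ≠ 0.


-- ===== PORT A =====
-- while True: dic[a]=pt; pt+=1; a = a*10 % b; if a==0: return (pt,0); if a in dic: return (pt-1, pt-dic[a])
-- fuel is only a totality guard (never exhausted when b ≠ 0; proved below).
def tmpLoopA (b : Int) (dic : PySem.Dict Int Int) (a : Int) (pt : Int) : Nat → Int × Int
  | 0 => (0, 0)
  | fuel + 1 =>
    let dic' := dic.insert a pt
    let pt' := pt + 1
    let a' := PySem.Int.mod (a * 10) b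
    if a' = 0 then (pt', 0)
    else
      match dic'.get? a' with
      | some j => (pt' - 1, pt' - j)
      | none => tmpLoopA b dic' a' pt' fuel

def tmp (a : Int) (b : Int) : Int × Int :=
  tmpLoopA b PySem.Dict.empty (PySem.Int.mod a b) 0 (b.natAbs + 1)

-- ===== PORT B =====
-- def step(r): return r * 10 % b
def bstep (b r : Int) : Int := PySem.Int.mod (r * 10) b

-- while slow != fast: slow = step(slow); fast = step(step(fast))   (fuel = totality guard)
def floydMeet (b slow fast : Int) : Nat → Int
  | 0 => slow
  | fuel + 1 => if slow = fast then slow else floydMeet b (bstep b slow) (bstep b (bstep b fast)) fuel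

-- mu = 0; slow = r0; while slow != fast: slow = step(slow); fast = step(fast); mu += 1
def floydMu (b slow fast mu : Int) : Nat → Int × Int
  | 0 => (slow, mu)
  | fuel + 1 => if slow = fast then (slow, mu) else floydMu b (bstep b slow) (bstep b fast) (mu + 1) fuel

-- lam = 1; cur = step(slow); while cur != slow: cur = step(cur); lam += 1
def floydLam (b s cur lam : Int) : Nat → Int
  | 0 => lam
  | fuel + 1 => if cur = s then lam else floydLam b s (bstep b cur) (lam + 1) fuel

def tmp_alt (a : Int) (b : Int) : Int × Int :=
  let r0 := PySem.Int.mod a b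
  let m := floydMeet b (bstep b r0) (bstep b (bstep b r0)) (b.natAbs + 1)
  let p := floydMu b r0 m 0 (b.natAbs + 1)
  let lam := floydLam b p.1 (bstep b p.1) 1 (b.natAbs + 1)
  if p.1 = 0 then (max p.2 1, 0) else (p.2 + lam - 1, lam)

-- ===== PRECONDITION & SPEC =====
-- Pre_ excludes only b = 0, on which Python A raises ZeroDivisionError.
def Pre_tmp (a : Int) (b : Int) : Prop := b ≠ 0
instance (a : Int) (b : Int) : Decidable (Pre_tmp a b) := by unfold Pre_tmp; infer_instance
def pvWitness_tmp : Int × Int := (1, 7)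

def Spec_tmp (a : Int) (b : Int) (out : Int × Int) : Prop := out = tmp_alt a b
instance (a : Int) (b : Int) (out : Int × Int) : Decidable (Spec_tmp a b out) := by unfold Spec_tmp; infer_instance

-- ===== CLAIM (what is proved, stated in full; the proofs are below) =====
def Claim_equal_tmp : Prop := ∀ (a : Int) (b : Int), Dom_tmp a b → Pre_tmp a b → Spec_tmp a b (tmp a b)

-- ===== LEMMAS AND PROOFS =====

-- the remainder sequence both programs walk
def rseq (b x0 : Int) (n : Nat) : Int := (bstep b)^[n] x0

-- the set of values PySem.Int.mod (· b) takes, b ≠ 0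
def inRange (b x : Int) : Prop := (0 < b ∧ 0 ≤ x ∧ x < b) ∨ (b < 0 ∧ b < x ∧ x ≤ 0)

-- ρ-shape data of the sequence: μ = prefix length, lam = cycle length
def RhoPack (b x0 : Int) (μ lam : Nat) : Prop :=
  0 < lam ∧ μ + lam ≤ b.natAbs ∧ rseq b x0 (μ + lam) = rseq b x0 μ ∧
  ∀ i j : Nat, i < j → rseq b x0 i = rseq b x0 j → μ ≤ i ∧ lam ∣ (j - i)

-- the common output both ports produce
def rhoOut (b x0 : Int) (μ lam : Nat) : Int × Int :=
  if rseq b x0 μ = 0 then (((max μ 1 : Nat) : Int), 0)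
  else (((μ + lam : Nat) : Int) - 1, (lam : Int))

lemma rseq_succ (b x0 : Int) (n : Nat) : rseq b x0 (n + 1) = bstep b (rseq b x0 n) := by
  simp [rseq, Function.iterate_succ_apply']

lemma rseq_add (b x0 : Int) (m s : Nat) : rseq b x0 (m + s) = (bstep b)^[s] (rseq b x0 m) := by
  simp [rseq, Nat.add_comm m s, Function.iterate_add_apply]

lemma mod_inRange (b x : Int) (hb : b ≠ 0) : inRange b (PySem.Int.mod x b) := by
  rcases lt_or_gt_of_ne hb with h | h
  · exact Or.inr ⟨h, (PySem.Int.mod_neg_bounds x h).1, (PySem.Int.mod_neg_bounds x h).2⟩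
  · exact Or.inl ⟨h, PySem.Int.mod_nonneg x h, PySem.Int.mod_lt x h⟩

lemma rseq_inRange (b x0 : Int) (hb : b ≠ 0) (h0 : inRange b x0) (n : Nat) :
    inRange b (rseq b x0 n) := by
  induction n with
  | zero => exact h0
  | succ n ih => rw [rseq_succ]; exact mod_inRange b _ hb

lemma bstep_zero (b : Int) : bstep b 0 = 0 := by
  show PySem.Int.mod (0 * 10) b = 0
  rw [zero_mul, PySem.Int.mod_eq_zero_iff_dvd]
  exact dvd_zero b

-- pigeonhole: a repeat exists among the first |b|+1 values
lemma rseq_repeat (b x0 : Int) (hb : b ≠ 0) (h0 : inRange b x0) :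
    ∃ i j : Nat, i < j ∧ j ≤ b.natAbs ∧ rseq b x0 i = rseq b x0 j := by
  have hpos : 0 < b.natAbs := Int.natAbs_pos.mpr hb
  have hf : ∀ i : Fin (b.natAbs + 1), (rseq b x0 i.val).natAbs < b.natAbs := by
    intro i
    have := rseq_inRange b x0 hb h0 i.val
    unfold inRange at this; omega
  obtain ⟨i, j, hne, heq⟩ :=
    Fintype.exists_ne_map_eq_of_card_lt
      (fun i : Fin (b.natAbs + 1) => (⟨(rseq b x0 i.val).natAbs, hf i⟩ : Fin b.natAbs))
      (by simp)
  have heq' : (rseq b x0 i.val).natAbs = (rseq b x0 j.val).natAbs := by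
    simpa using congrArg Fin.val heq
  have hreq : rseq b x0 i.val = rseq b x0 j.val := by
    have hi := rseq_inRange b x0 hb h0 i.val
    have hj := rseq_inRange b x0 hb h0 j.val
    unfold inRange at hi hj; omega
  have hvne : i.val ≠ j.val := fun h => hne (Fin.val_injective h)
  rcases Nat.lt_or_ge i.val j.val with h | h
  · exact ⟨i.val, j.val, h, by omega, hreq⟩
  · exact ⟨j.val, i.val, by omega, by omega, hreq.symm⟩

lemma rho_exists (b x0 : Int) (hb : b ≠ 0) (h0 : inRange b x0) :
    ∃ μ lam : Nat, RhoPack b x0 μ lam := by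
  classical
  obtain ⟨i0, j0, hlt0, hle0, heq0⟩ := rseq_repeat b x0 hb h0
  have hP : ∃ n : Nat, ∃ k : Nat, k < n ∧ rseq b x0 k = rseq b x0 n := ⟨j0, i0, hlt0, heq0⟩
  set N := Nat.find hP with hNdef
  obtain ⟨k0, hk0lt, hk0eq⟩ := Nat.find_spec hP
  have hNmin : ∀ m : Nat, m < N → ¬ ∃ k : Nat, k < m ∧ rseq b x0 k = rseq b x0 m :=
    fun m hm => Nat.find_min hP hm
  have hNle : N ≤ j0 := Nat.find_min' hP ⟨i0, hlt0, heq0⟩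
  have hQ : ∃ k : Nat, rseq b x0 k = rseq b x0 N := ⟨k0, hk0eq⟩
  set μ := Nat.find hQ with hμdef
  have hμeq : rseq b x0 μ = rseq b x0 N := Nat.find_spec hQ
  have hμmin : ∀ m : Nat, m < μ → rseq b x0 m ≠ rseq b x0 N := fun m hm => Nat.find_min hQ hm
  have hμltN : μ < N := lt_of_le_of_lt (Nat.find_min' hQ hk0eq) hk0lt
  refine ⟨μ, N - μ, by omega, by omega, ?_, ?_⟩
  · rw [show μ + (N - μ) = N by omega]; exact hμeq.symm
  · -- P4
    have inj0 : ∀ i j : Nat, i < j → j < N → rseq b x0 i ≠ rseq b x0 j := by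
      intro i j hij hjN habs
      exact hNmin j hjN ⟨i, hij, habs⟩
    have hP3 : rseq b x0 (μ + (N - μ)) = rseq b x0 μ := by
      rw [show μ + (N - μ) = N by omega]; exact hμeq.symm
    have per : ∀ s : Nat, rseq b x0 (μ + (N - μ) + s) = rseq b x0 (μ + s) := by
      intro s
      rw [rseq_add b x0 (μ + (N - μ)) s, rseq_add b x0 μ s, hP3]
    have pert : ∀ k t : Nat, μ ≤ k → rseq b x0 (k + t * (N - μ)) = rseq b x0 k := by
      intro k t hk
      induction t with
      | zero => simp
      | succ t ih =>
        have hmul : (t + 1) * (N - μ) = t * (N - μ) + (N - μ) := by ring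
        have h1 : k + (t + 1) * (N - μ) = (μ + (N - μ)) + (k - μ + t * (N - μ)) := by
          have := hμltN; omega
        rw [h1, per, show μ + (k - μ + t * (N - μ)) = k + t * (N - μ) by omega, ih]
    have red : ∀ k : Nat, μ ≤ k → rseq b x0 k = rseq b x0 (μ + (k - μ) % (N - μ)) := by
      intro k hk
      have hd := Nat.div_add_mod (k - μ) (N - μ)
      have hc : ((k - μ) / (N - μ)) * (N - μ) = (N - μ) * ((k - μ) / (N - μ)) := by ring
      have h1 : k = (μ + (k - μ) % (N - μ)) + ((k - μ) / (N - μ)) * (N - μ) := by omega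
      conv_lhs => rw [h1]
      exact pert _ _ (by omega)
    have hmodlt : ∀ k : Nat, (k - μ) % (N - μ) < N - μ := fun k => Nat.mod_lt _ (by omega)
    intro i j hij heq
    have hμi : μ ≤ i := by
      by_contra hiμ
      push_neg at hiμ
      have hjN : N ≤ j := by
        by_contra hjN
        push_neg at hjN
        exact inj0 i j hij hjN heq
      have hμj : μ ≤ j := by omega
      have hred := red j hμj
      have hk' : μ + (j - μ) % (N - μ) < N := by have := hmodlt j; omega
      have : rseq b x0 i = rseq b x0 (μ + (j - μ) % (N - μ)) := by rw [heq, ← hred]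
      exact inj0 i _ (by omega) hk' this
    have hμj : μ ≤ j := by omega
    refine ⟨hμi, ?_⟩
    have hi' := red i hμi
    have hj' := red j hμj
    have hieq : (i - μ) % (N - μ) = (j - μ) % (N - μ) := by
      by_contra hne
      have h1 : μ + (i - μ) % (N - μ) < N := by have := hmodlt i; omega
      have h2 : μ + (j - μ) % (N - μ) < N := by have := hmodlt j; omega
      have heq2 : rseq b x0 (μ + (i - μ) % (N - μ)) = rseq b x0 (μ + (j - μ) % (N - μ)) := by
        rw [← hi', ← hj', heq]
      rcases Nat.lt_or_ge ((i - μ) % (N - μ)) ((j - μ) % (N - μ)) with h | h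
      · exact inj0 _ _ (by omega) h2 heq2
      · exact inj0 _ _ (by omega) h1 heq2.symm
    have : (i - μ) ≡ (j - μ) [MOD N - μ] := hieq
    have hdvd : (N - μ) ∣ (j - μ) - (i - μ) := (Nat.modEq_iff_dvd' (by omega)).mp this
    rwa [show (j - μ) - (i - μ) = j - i by omega] at hdvd

lemma rho_period (b x0 : Int) (μ lam : Nat) (h : RhoPack b x0 μ lam) :
    ∀ k t : Nat, μ ≤ k → rseq b x0 (k + t * lam) = rseq b x0 k := by
  obtain ⟨hlam, hle, hP3, hP4⟩ := h
  have per : ∀ s : Nat, rseq b x0 (μ + lam + s) = rseq b x0 (μ + s) := by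
    intro s
    rw [rseq_add b x0 (μ + lam) s, rseq_add b x0 μ s, hP3]
  intro k t hk
  induction t with
  | zero => simp
  | succ t ih =>
    have hmul : (t + 1) * lam = t * lam + lam := by ring
    have h1 : k + (t + 1) * lam = (μ + lam) + (k - μ + t * lam) := by omega
    rw [h1, per, show μ + (k - μ + t * lam) = k + t * lam by omega, ih]

lemma rho_inj (b x0 : Int) (μ lam : Nat) (h : RhoPack b x0 μ lam) :
    ∀ i j : Nat, i < μ + lam → j < μ + lam → rseq b x0 i = rseq b x0 j → i = j := by
  intro i j hi hj heq
  rcases lt_trichotomy i j with hlt | heqij | hgt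
  · obtain ⟨hμi, hdvd⟩ := h.2.2.2 i j hlt heq
    have := Nat.le_of_dvd (by omega) hdvd
    omega
  · exact heqij
  · obtain ⟨hμj, hdvd⟩ := h.2.2.2 j i hgt heq.symm
    have := Nat.le_of_dvd (by omega) hdvd
    omega

-- if the sequence ever hits 0 then the cycle is {0}: lam = 1 and r μ = 0
lemma rho_zero (b x0 : Int) (μ lam : Nat) (h : RhoPack b x0 μ lam) (n : Nat)
    (hz : rseq b x0 n = 0) : rseq b x0 μ = 0 ∧ lam = 1 := by
  have hstep : rseq b x0 (n + 1) = rseq b x0 n := by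
    rw [rseq_succ, hz, bstep_zero]
  obtain ⟨hμn, hdvd⟩ := h.2.2.2 n (n + 1) (by omega) hstep.symm
  have hlam1 : lam = 1 := by
    have hd : lam ∣ 1 := by rwa [show n + 1 - n = 1 by omega] at hdvd
    exact Nat.dvd_one.mp hd
  refine ⟨?_, hlam1⟩
  have := rho_period b x0 μ lam h μ (n - μ) (le_refl μ)
  rw [hlam1] at this
  rw [show μ + (n - μ) * 1 = n by omega] at this
  rw [this] at hz
  exact hz

lemma rho_zero_tail (b x0 : Int) (μ lam : Nat) (h : RhoPack b x0 μ lam)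
    (hzmu : rseq b x0 μ = 0) :
    ∀ k : Nat, (μ ≤ k → rseq b x0 k = 0) ∧ (k < μ → rseq b x0 k ≠ 0) := by
  have htail : ∀ d : Nat, rseq b x0 (μ + d) = 0 := by
    intro d
    induction d with
    | zero => simpa using hzmu
    | succ d ih =>
      rw [show μ + (d + 1) = (μ + d) + 1 by omega, rseq_succ, ih, bstep_zero]
  intro k
  constructor
  · intro hk
    have := htail (k - μ)
    rwa [show μ + (k - μ) = k by omega] at this
  · intro hk habs
    have hstep : rseq b x0 (k + 1) = rseq b x0 k := by
      rw [rseq_succ, habs, bstep_zero]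
    obtain ⟨hμk, _⟩ := h.2.2.2 k (k + 1) (by omega) hstep.symm
    omega

-- ===== A-side characterization =====
lemma tmpLoopA_run (b x0 : Int) (μ lam : Nat) (h : RhoPack b x0 μ lam) :
    ∀ (fuel k : Nat) (dic : PySem.Dict Int Int),
      k < (if rseq b x0 μ = 0 then max μ 1 else μ + lam) →
      (if rseq b x0 μ = 0 then max μ 1 else μ + lam) - k ≤ fuel →
      (∀ j : Nat, j < k → dic.get? (rseq b x0 j) = some (j : Int)) →
      (∀ x : Int, (∀ j : Nat, j < k → rseq b x0 j ≠ x) → dic.get? x = none) →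
      tmpLoopA b dic (rseq b x0 k) (k : Int) fuel = rhoOut b x0 μ lam := by
  have hlam := h.1
  have hNle : (if rseq b x0 μ = 0 then max μ 1 else μ + lam) ≤ μ + lam := by
    split <;> omega
  intro fuel
  induction fuel with
  | zero => intro k dic hk hfuel _ _; omega
  | succ fuel ih =>
    intro k dic hk hfuel hd1 hd2
    have hkμlam : k + 1 ≤ μ + lam := by omega
    have ha' : PySem.Int.mod (rseq b x0 k * 10) b = rseq b x0 (k + 1) := (rseq_succ b x0 k).symm
    -- updated dict invariants
    have hd1' : ∀ j : Nat, j < k + 1 →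
        (dic.insert (rseq b x0 k) (k : Int)).get? (rseq b x0 j) = some (j : Int) := by
      intro j hj
      rcases Nat.lt_or_ge j k with hjk | hjk
      · rw [PySem.Dict.get?_insert_of_ne]
        · exact hd1 j hjk
        · intro habs
          have := rho_inj b x0 μ lam h j k (by omega) (by omega) habs
          omega
      · have : j = k := by omega
        subst this
        exact PySem.Dict.get?_insert_self dic (rseq b x0 j) (j : Int)
    have hd2' : ∀ x : Int, (∀ j : Nat, j < k + 1 → rseq b x0 j ≠ x) →
        (dic.insert (rseq b x0 k) (k : Int)).get? x = none := by
      intro x hx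
      rw [PySem.Dict.get?_insert_of_ne]
      · exact hd2 x (fun j hj => hx j (by omega))
      · exact fun habs => hx k (by omega) habs.symm
    simp only [tmpLoopA, ha']
    by_cases hz : rseq b x0 (k + 1) = 0
    · -- zero branch: k+1 must be the stop index in the zero case
      have hμz : rseq b x0 μ = 0 ∧ lam = 1 := rho_zero b x0 μ lam h (k + 1) hz
      have hge : μ ≤ k + 1 := by
        by_contra habs
        exact (rho_zero_tail b x0 μ lam h hμz.1 (k + 1)).2 (by omega) hz
      have hkN : k + 1 = max μ 1 := by
        rw [if_pos hμz.1] at hk; omega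
      rw [if_pos hz]
      unfold rhoOut
      rw [if_pos hμz.1]
      simp only [Prod.mk.injEq]
      push_cast
      refine ⟨?_, trivial⟩
      omega
    · rw [if_neg hz]
      -- is r (k+1) already a key?
      by_cases hrep : ∃ j : Nat, j < k + 1 ∧ rseq b x0 j = rseq b x0 (k + 1)
      · obtain ⟨j0, hj0lt, hj0eq⟩ := hrep
        -- this is the first repeat: k+1 = μ + lam, j0 = μ, and we are in the nonzero case
        obtain ⟨hμj0, hdvd⟩ := h.2.2.2 j0 (k + 1) hj0lt hj0eq
        have hlamle : lam ≤ k + 1 - j0 := Nat.le_of_dvd (by omega) hdvd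
        have hkN : k + 1 = μ + lam := by omega
        have hznot : rseq b x0 μ ≠ 0 := by
          intro habs
          have h1 := (rho_zero_tail b x0 μ lam h habs (k + 1)).1 (by omega)
          exact hz h1
        have hj0μ : j0 = μ := by
          have h1 : rseq b x0 (k + 1) = rseq b x0 μ := by rw [hkN]; exact h.2.2.1
          have : rseq b x0 j0 = rseq b x0 μ := by rw [hj0eq, h1]
          exact rho_inj b x0 μ lam h j0 μ (by omega) (by omega) this
        have hlook : (dic.insert (rseq b x0 k) (k : Int)).get? (rseq b x0 (k + 1)) = some (μ : Int) := by
          have := hd1' μ (by omega)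
          rw [← hj0μ] at this ⊢
          rw [← hj0eq]
          exact this
        rw [hlook]
        unfold rhoOut
        rw [if_neg hznot]
        simp only [Prod.mk.injEq]
        push_cast
        omega
      · -- no repeat yet: the lookup misses and we recurse
        push_neg at hrep
        have hlook : (dic.insert (rseq b x0 k) (k : Int)).get? (rseq b x0 (k + 1)) = none :=
          hd2' _ (fun j hj habs => hrep j hj habs)
        rw [hlook]
        have hklt : k + 1 < (if rseq b x0 μ = 0 then max μ 1 else μ + lam) := by
          rcases Nat.lt_or_ge (k + 1) (if rseq b x0 μ = 0 then max μ 1 else μ + lam) with h' | h'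
          · exact h'
          · exfalso
            have hkN : k + 1 = (if rseq b x0 μ = 0 then max μ 1 else μ + lam) := by omega
            by_cases hμz : rseq b x0 μ = 0
            · rw [if_pos hμz] at hkN
              exact hz ((rho_zero_tail b x0 μ lam h hμz (k + 1)).1 (by omega))
            · rw [if_neg hμz] at hkN
              exact hrep μ (by omega) (by rw [hkN]; exact h.2.2.1.symm)
        have := ih (k + 1) (dic.insert (rseq b x0 k) (k : Int)) hklt (by omega) hd1' hd2'
        rw [show ((k : Int) + 1) = ((k + 1 : Nat) : Int) by push_cast; ring]
        exact this

-- ===== B-side characterization =====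
lemma floydMeet_run (b x0 : Int) (M : Nat) (h1 : 1 ≤ M) (hM : rseq b x0 M = rseq b x0 (2 * M))
    (hmin : ∀ n : Nat, 1 ≤ n → n < M → rseq b x0 n ≠ rseq b x0 (2 * n)) :
    ∀ (fuel i : Nat), 1 ≤ i → i ≤ M → M - i < fuel →
      floydMeet b (rseq b x0 i) (rseq b x0 (2 * i)) fuel = rseq b x0 M := by
  intro fuel
  induction fuel with
  | zero => intro i _ _ hf; omega
  | succ fuel ih =>
    intro i hi1 hiM hf
    simp only [floydMeet]
    by_cases hit : rseq b x0 i = rseq b x0 (2 * i)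
    · have : i = M := by
        by_contra hne
        exact hmin i hi1 (by omega) hit
      rw [if_pos hit, this]
    · rw [if_neg hit]
      have e1 : bstep b (rseq b x0 i) = rseq b x0 (i + 1) := (rseq_succ b x0 i).symm
      have e2 : bstep b (bstep b (rseq b x0 (2 * i))) = rseq b x0 (2 * (i + 1)) := by
        rw [show 2 * (i + 1) = 2 * i + 1 + 1 by omega, rseq_succ, rseq_succ]
      rw [e1, e2]
      have hiM' : i < M := by
        rcases Nat.lt_or_ge i M with h' | h'
        · exact h'
        · exact absurd hM (by rw [show i = M by omega] at hit; exact hit)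
      exact ih (i + 1) (by omega) (by omega) (by omega)

lemma floydMu_run (b x0 : Int) (μ M : Nat)
    (hiff : ∀ m : Nat, rseq b x0 m = rseq b x0 (M + m) ↔ μ ≤ m) :
    ∀ (fuel k : Nat), k ≤ μ → μ - k < fuel →
      floydMu b (rseq b x0 k) (rseq b x0 (M + k)) (k : Int) fuel = (rseq b x0 μ, (μ : Int)) := by
  intro fuel
  induction fuel with
  | zero => intro k _ hf; omega
  | succ fuel ih =>
    intro k hk hf
    simp only [floydMu]
    by_cases hit : rseq b x0 k = rseq b x0 (M + k)
    · have : k = μ := by have := (hiff k).mp hit; omega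
      rw [if_pos hit, this]
    · rw [if_neg hit]
      have hkμ : k < μ := by
        have := (hiff k).mpr
        by_contra habs
        exact hit (this (by omega))
      have e1 : bstep b (rseq b x0 k) = rseq b x0 (k + 1) := (rseq_succ b x0 k).symm
      have e2 : bstep b (rseq b x0 (M + k)) = rseq b x0 (M + (k + 1)) := by
        rw [show M + (k + 1) = (M + k) + 1 by omega, rseq_succ]
      rw [e1, e2]
      have := ih (k + 1) (by omega) (by omega)
      rw [show ((k : Int) + 1) = ((k + 1 : Nat) : Int) by push_cast; ring]
      exact this

lemma floydLam_run (b x0 : Int) (μ lam : Nat) (hlam : 0 < lam)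
    (hiff : ∀ t : Nat, 1 ≤ t → (rseq b x0 (μ + t) = rseq b x0 μ ↔ lam ∣ t)) :
    ∀ (fuel t : Nat), 1 ≤ t → t ≤ lam → lam - t < fuel →
      floydLam b (rseq b x0 μ) (rseq b x0 (μ + t)) (t : Int) fuel = (lam : Int) := by
  intro fuel
  induction fuel with
  | zero => intro t _ _ hf; omega
  | succ fuel ih =>
    intro t ht1 htlam hf
    simp only [floydLam]
    by_cases hit : rseq b x0 (μ + t) = rseq b x0 μ
    · have hdvd := (hiff t ht1).mp hit
      have : t = lam := by
        have := Nat.le_of_dvd (by omega) hdvd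
        omega
      rw [if_pos hit, this]
    · rw [if_neg hit]
      have htl : t < lam := by
        rcases Nat.lt_or_ge t lam with h' | h'
        · exact h'
        · have : t = lam := by omega
          exact absurd ((hiff t ht1).mpr (this ▸ dvd_refl lam)) hit
      have e1 : bstep b (rseq b x0 (μ + t)) = rseq b x0 (μ + (t + 1)) := by
        rw [show μ + (t + 1) = (μ + t) + 1 by omega, rseq_succ]
      rw [e1]
      have := ih (t + 1) (by omega) (by omega) (by omega)
      rw [show ((t : Int) + 1) = ((t + 1 : Nat) : Int) by push_cast; ring]
      exact this

lemma portA_eq (a b : Int) (hb : b ≠ 0) (μ lam : Nat)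
    (h : RhoPack b (PySem.Int.mod a b) μ lam) :
    tmp a b = rhoOut b (PySem.Int.mod a b) μ lam := by
  have hlam := h.1
  have hle := h.2.1
  have h0 : rseq b (PySem.Int.mod a b) 0 = PySem.Int.mod a b := rfl
  have := tmpLoopA_run b (PySem.Int.mod a b) μ lam h (b.natAbs + 1) 0 PySem.Dict.empty
    (by split <;> omega)
    (by split <;> omega)
    (by intro j hj; omega)
    (by intro x _; exact PySem.Dict.get?_empty x)
  unfold tmp
  rw [← h0]
  simpa using this

lemma portB_eq (a b : Int) (hb : b ≠ 0) (μ lam : Nat)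
    (h : RhoPack b (PySem.Int.mod a b) μ lam) :
    tmp_alt a b = rhoOut b (PySem.Int.mod a b) μ lam := by
  classical
  set x0 := PySem.Int.mod a b with hx0def
  have hlam := h.1
  have hle := h.2.1
  have hP4 := h.2.2.2
  -- a meeting point exists: the least multiple of lam that is ≥ max μ 1
  have hex : ∃ n : Nat, 1 ≤ n ∧ rseq b x0 n = rseq b x0 (2 * n) := by
    obtain ⟨q, rem, hqr, hremlt⟩ : ∃ q rem : Nat, lam * q + rem = max μ 1 + lam - 1 ∧ rem < lam :=
      ⟨(max μ 1 + lam - 1) / lam, (max μ 1 + lam - 1) % lam, Nat.div_add_mod _ _, Nat.mod_lt _ (by omega)⟩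
    refine ⟨lam * q, by omega, ?_⟩
    have := rho_period b x0 μ lam h (lam * q) q (by omega)
    rw [show lam * q + q * lam = 2 * (lam * q) by ring] at this
    exact this.symm
  set M := Nat.find hex with hMdef
  obtain ⟨hM1, hMeq⟩ := Nat.find_spec hex
  have hMmin : ∀ n : Nat, 1 ≤ n → n < M → rseq b x0 n ≠ rseq b x0 (2 * n) := by
    intro n h1 hn habs
    exact Nat.find_min hex hn ⟨h1, habs⟩
  have hMle : M ≤ b.natAbs := by
    obtain ⟨q, rem, hqr, hremlt⟩ : ∃ q rem : Nat, lam * q + rem = max μ 1 + lam - 1 ∧ rem < lam :=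
      ⟨(max μ 1 + lam - 1) / lam, (max μ 1 + lam - 1) % lam, Nat.div_add_mod _ _, Nat.mod_lt _ (by omega)⟩
    have hwit : 1 ≤ lam * q ∧ rseq b x0 (lam * q) = rseq b x0 (2 * (lam * q)) := by
      refine ⟨by omega, ?_⟩
      have := rho_period b x0 μ lam h (lam * q) q (by omega)
      rw [show lam * q + q * lam = 2 * (lam * q) by ring] at this
      exact this.symm
    have := Nat.find_min' hex hwit
    omega
  obtain ⟨hμM, hdvdM⟩ := hP4 M (2 * M) (by omega) hMeq
  have hdvdM' : lam ∣ M := by rwa [show 2 * M - M = M by omega] at hdvdM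
  -- characterize phase 2
  have hiffMu : ∀ m : Nat, rseq b x0 m = rseq b x0 (M + m) ↔ μ ≤ m := by
    intro m
    constructor
    · intro heq
      exact (hP4 m (M + m) (by omega) heq).1
    · intro hμm
      obtain ⟨d, hd⟩ := hdvdM'
      have hc : d * lam = lam * d := by ring
      have := rho_period b x0 μ lam h m d hμm
      rw [show m + d * lam = M + m by omega] at this
      exact this.symm
  -- characterize phase 3
  have hiffLam : ∀ t : Nat, 1 ≤ t → (rseq b x0 (μ + t) = rseq b x0 μ ↔ lam ∣ t) := by
    intro t ht
    constructor
    · intro heq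
      have := (hP4 μ (μ + t) (by omega) heq.symm).2
      rwa [show μ + t - μ = t by omega] at this
    · intro ⟨d, hd⟩
      have hc : d * lam = lam * d := by ring
      have := rho_period b x0 μ lam h μ d (le_refl μ)
      rw [show μ + d * lam = μ + t by omega] at this
      exact this
  -- now run the three phases
  have e0 : bstep b x0 = rseq b x0 1 := rfl
  have e00 : bstep b (bstep b x0) = rseq b x0 (2 * 1) := rfl
  have hMrun := floydMeet_run b x0 M hM1 hMeq hMmin (b.natAbs + 1) 1 (le_refl 1) hM1 (by omega)
  have hMurun := floydMu_run b x0 μ M hiffMu (b.natAbs + 1) 0 (by omega) (by omega)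
  rw [show M + 0 = M by omega] at hMurun
  have h00 : rseq b x0 0 = x0 := rfl
  rw [h00] at hMurun
  have hcast0 : ((0 : Nat) : Int) = 0 := rfl
  rw [hcast0] at hMurun
  have hLrun := floydLam_run b x0 μ lam hlam hiffLam (b.natAbs + 1) 1 (le_refl 1) (by omega) (by omega)
  have e3 : bstep b (rseq b x0 μ) = rseq b x0 (μ + 1) := (rseq_succ b x0 μ).symm
  have hcast1 : ((1 : Nat) : Int) = 1 := rfl
  rw [hcast1] at hLrun
  simp only [tmp_alt]
  rw [← hx0def, e00, e0]
  simp only [hMrun, hMurun, e3, hLrun]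
  unfold rhoOut
  split_ifs with hzz
  · simp only [Prod.mk.injEq]
    push_cast
    exact ⟨rfl, trivial⟩
  · simp only [Prod.mk.injEq]
    push_cast
    exact ⟨rfl, trivial⟩

-- ===== VERDICT (by name: the statement is the Claim_ definition above) =====
theorem tmp_spec : Claim_equal_tmp := by
  intro a b _ hb
  unfold Spec_tmp
  obtain ⟨μ, lam, h⟩ := rho_exists b (PySem.Int.mod a b) hb (mod_inRange b a hb)
  rw [portA_eq a b hb μ lam h, portB_eq a b hb μ lam h]
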